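-- pv_equiv track=rewrite | github.com/Zaoerdd/wei-class | web.py | normalize_proxy_server
-- ===== SOURCE A (Python) =====
-- from typing import Any, Dict, List, Optional, Set, Tuple
--
-- def normalize_proxy_server(proxy_server: Optional[str]) -> Optional[str]:
--     raw = str(proxy_server or "").strip()
--     if not raw:
--         return None
--     if "=" not in raw:
--         return raw
--
--     entries: Dict[str, str] = {}
--     first_value = None
--     for item in raw.split(";"):
--         item = item.strip()
--         if not item or "=" not in item:
--             continue
--         scheme, value = item.split("=", 1)
--         scheme = scheme.strip().lower()
--         value = value.strip()
--         if not value: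
--             continue
--         entries[scheme] = value
--         if first_value is None:
--             first_value = value
--
--     for preferred in ("http", "https"):
--         if entries.get(preferred):
--             return entries[preferred]
--     return first_value
-- ===== SOURCE B (Python) =====
-- def normalize_proxy_server(proxy_server):
--     raw = (proxy_server or "").strip()
--     if not raw:
--         return None
--     if "=" not in raw:
--         return raw
--     # Single reverse scan: the first valid pair met is the LAST occurrence of
--     # its scheme, so an http pair can short-circuit immediately; an https pair
--     # is latched once; the overall-first value ends up as the last assignment.
--     https = first = None
--     for item in reversed(raw.split(";")):
--         item = item.strip()
--         if "=" not in item: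
--             continue
--         scheme, value = item.split("=", 1)
--         value = value.strip()
--         if not value:
--             continue
--         scheme = scheme.strip().lower()
--         if scheme == "http":
--             return value
--         if scheme == "https" and https is None:
--             https = value
--         first = value
--     return https if https is not None else first
-- ===== Notes on version B (the rewrite author's own statement) =====
-- stated objective: alternative
-- what changed: B replaces A's forward pass that builds a dict plus a first_value tracker and then does preference lookups by a single backward scan over the split items with three scalar slots: the first valid pair met in reverse is the last occurrence of its scheme, so an http pair returns immediately (early exit), an https value is latched once, and the overall-first value is whatever the scan assigns last; no dict or pair list is materialized.
import Mathlib
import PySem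

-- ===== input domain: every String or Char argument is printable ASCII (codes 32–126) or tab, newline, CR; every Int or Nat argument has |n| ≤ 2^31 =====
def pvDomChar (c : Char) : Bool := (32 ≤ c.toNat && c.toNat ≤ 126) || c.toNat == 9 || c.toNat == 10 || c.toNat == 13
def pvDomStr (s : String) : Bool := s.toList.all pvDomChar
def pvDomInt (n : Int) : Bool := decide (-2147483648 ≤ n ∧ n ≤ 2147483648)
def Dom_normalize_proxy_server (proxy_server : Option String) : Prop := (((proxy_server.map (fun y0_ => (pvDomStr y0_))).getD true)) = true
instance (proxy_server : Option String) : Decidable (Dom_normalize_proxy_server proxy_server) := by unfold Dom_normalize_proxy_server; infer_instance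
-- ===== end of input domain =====

-- B replaces A's forward dict-building pass + preference lookup by a single backward scan
-- with three scalar slots (early exit on http); return values are proved equal everywhere.


-- ===== PORT A =====
-- truthiness of `entries.get(preferred)` (None or a string): true iff a non-empty string
def pvTruthy (o : Option String) : Bool := o.getD "" ≠ ""

-- loop body of A's `for item in raw.split(";")`; state = (entries, first_value)
def pvStepA (st : PySem.Dict String String × Option String) (item : String) :
    PySem.Dict String String × Option String :=
  let item := PySem.Str.strip item
  if item = "" ∨ PySem.Str.isIn "=" item = false then st   -- `continue`
  else
    match PySem.Str.splitMax? item "=" 1 with               -- item.split("=", 1)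
    | some (scheme :: value :: _) =>
        let scheme := PySem.Str.lower (PySem.Str.strip scheme)
        let value := PySem.Str.strip value
        if value = "" then st                               -- `continue`
        else (st.1.insert scheme value, if st.2 = none then some value else st.2)
    | _ => st   -- unreachable: "=" ∈ item gives exactly two parts

def normalize_proxy_server (proxy_server : Option String) : Option String :=
  let raw := PySem.Str.strip (proxy_server.getD "")          -- str(proxy_server or "").strip()
  if raw = "" then none
  else if PySem.Str.isIn "=" raw = false then some raw
  else
    let st := ((PySem.Str.split? raw ";").getD []).foldl pvStepA (PySem.Dict.empty, none)
    if pvTruthy (st.1.get? "http") then st.1.get? "http"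
    else if pvTruthy (st.1.get? "https") then st.1.get? "https"
    else st.2

-- ===== PORT B =====
-- B's backward loop over the reversed items; state = (https, first); `return value` = early exit
def pvLoopB : List String → Option String → Option String → Option String
  | [], https, first => match https with | some v => some v | none => first
  | item :: rest, https, first =>
    let item := PySem.Str.strip item
    if PySem.Str.isIn "=" item = false then pvLoopB rest https first   -- `continue`
    else
      match PySem.Str.splitMax? item "=" 1 with             -- item.split("=", 1)
      | some (scheme :: value :: _) =>
        let value := PySem.Str.strip value
        if value = "" then pvLoopB rest https first         -- `continue`
        else
          let scheme := PySem.Str.lower (PySem.Str.strip scheme)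
          if scheme = "http" then some value                -- `return value`
          else pvLoopB rest
                 (if scheme = "https" ∧ https = none then some value else https)
                 (some value)
      | _ => pvLoopB rest https first

def normalize_proxy_server_alt (proxy_server : Option String) : Option String :=
  let raw := PySem.Str.strip (proxy_server.getD "")
  if raw = "" then none
  else if PySem.Str.isIn "=" raw = false then some raw
  else pvLoopB (((PySem.Str.split? raw ";").getD []).reverse) none none

-- ===== PRECONDITION & SPEC =====
def Spec_normalize_proxy_server (proxy_server : Option String) (out : Option String) : Prop := out = normalize_proxy_server_alt proxy_server
instance (proxy_server : Option String) (out : Option String) : Decidable (Spec_normalize_proxy_server proxy_server out) := by unfold Spec_normalize_proxy_server; infer_instance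

-- ===== CLAIM (what is proved, stated in full; the proofs are below) =====
def Claim_equal_normalize_proxy_server : Prop := ∀ (proxy_server : Option String), Dom_normalize_proxy_server proxy_server → Spec_normalize_proxy_server proxy_server (normalize_proxy_server proxy_server)

-- ===== LEMMAS AND PROOFS =====

-- proof-side: the (scheme, value) pair one item contributes (none if skipped)
def pvParse (item : String) : Option (String × String) :=
  let item := PySem.Str.strip item
  if PySem.Str.isIn "=" item = false then none
  else
    match PySem.Str.splitMax? item "=" 1 with
    | some (scheme :: value :: _) =>
      let value := PySem.Str.strip value
      if value = "" then none
      else some (PySem.Str.lower (PySem.Str.strip scheme), value)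
    | _ => none

-- proof-side: what pvLoopB computes, as a function of the parsed pair list
def pvSel (Q : List (String × String)) (https first : Option String) : Option String :=
  match Q.find? (fun q => q.1 == "http") with
  | some q => some q.2
  | none =>
    match https with
    | some v => some v
    | none =>
      match Q.find? (fun q => q.1 == "https") with
      | some q => some q.2
      | none =>
        match Q.getLast? with
        | some q => some q.2
        | none => first

lemma pvSel_cons (s v : String) (Q : List (String × String)) (https first : Option String)
    (hne : s ≠ "http") :
    pvSel ((s, v) :: Q) https first
      = pvSel Q (if s = "https" ∧ https = none then some v else https) (some v) := by
  unfold pvSel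
  have h1 : (((s, v) : String × String).1 == "http") = false := by
    simp only [beq_eq_false_iff_ne]; exact hne
  simp only [List.find?_cons, h1]
  cases https with
  | some w => simp
  | none =>
    by_cases hs : s = "https"
    · simp [hs]
    · have h2 : (((s, v) : String × String).1 == "https") = false := by
        simp only [beq_eq_false_iff_ne]; exact hs
      rw [if_neg (by simp [hs])]
      simp only [h2]
      cases Q with
      | nil => simp
      | cons q qs =>
        rw [List.getLast?_cons_cons]
        have hx : (q :: qs).getLast?.isSome := by
          rw [List.getLast?_isSome]; simp
        obtain ⟨x, hx⟩ := Option.isSome_iff_exists.mp hx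
        rw [hx]

lemma pvLoopB_eq_pvSel (l : List String) (https first : Option String) :
    pvLoopB l https first = pvSel (l.filterMap pvParse) https first := by
  induction l generalizing https first with
  | nil => cases https <;> simp [pvLoopB, pvSel]
  | cons item rest ih =>
    rw [List.filterMap_cons]
    show pvLoopB (item :: rest) https first = _
    unfold pvLoopB
    by_cases hin : PySem.Str.isIn "=" (PySem.Str.strip item) = false
    · have hpi : pvParse item = none := by unfold pvParse; rw [if_pos hin]
      rw [if_pos hin, hpi]
      exact ih https first
    · rw [if_neg hin]
      cases hsp : PySem.Str.splitMax? (PySem.Str.strip item) "=" 1 with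
      | none =>
        have hpi : pvParse item = none := by unfold pvParse; rw [if_neg hin, hsp]
        rw [hpi]; exact ih https first
      | some parts =>
        rcases parts with _ | ⟨scheme, _ | ⟨value, restp⟩⟩
        · have hpi : pvParse item = none := by unfold pvParse; rw [if_neg hin, hsp]
          rw [hpi]; exact ih https first
        · have hpi : pvParse item = none := by unfold pvParse; rw [if_neg hin, hsp]
          rw [hpi]; exact ih https first
        · dsimp only
          by_cases hv : PySem.Str.strip value = ""
          · have hpi : pvParse item = none := by
              unfold pvParse; rw [if_neg hin, hsp]; dsimp only; rw [if_pos hv]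
            rw [if_pos hv, hpi]
            exact ih https first
          · have hpi : pvParse item
                = some (PySem.Str.lower (PySem.Str.strip scheme), PySem.Str.strip value) := by
              unfold pvParse; rw [if_neg hin, hsp]; dsimp only; rw [if_neg hv]
            rw [if_neg hv, hpi]
            by_cases hh : PySem.Str.lower (PySem.Str.strip scheme) = "http"
            · rw [if_pos hh, hh]
              simp [pvSel]
            · rw [if_neg hh, ih]
              exact (pvSel_cons _ _ _ https first hh).symm

-- the A-side loop invariant tying (dict, first_value) to the parsed pair list
def pvInv (st : PySem.Dict String String × Option String) (p : List (String × String)) : Prop :=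
  (∀ k, st.1.get? k = (p.reverse.find? (fun q => q.1 == k)).map (·.2)) ∧
  st.2 = p.head?.map (·.2) ∧
  (∀ q ∈ p, q.2 ≠ "")

lemma pvInv_step (st : PySem.Dict String String × Option String) (p : List (String × String))
    (h : pvInv st p) (item : String) :
    pvInv (pvStepA st item) (p ++ (pvParse item).toList) := by
  obtain ⟨hd, hf, hv⟩ := h
  unfold pvStepA
  by_cases hin : PySem.Str.isIn "=" (PySem.Str.strip item) = false
  · have hpi : pvParse item = none := by unfold pvParse; rw [if_pos hin]
    rw [if_pos (Or.inr hin), hpi]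
    simp only [Option.toList_none, List.append_nil]
    exact ⟨hd, hf, hv⟩
  · have hne : ¬ (PySem.Str.strip item = "" ∨ PySem.Str.isIn "=" (PySem.Str.strip item) = false) := by
      rintro (he | hfa)
      · exact hin (by rw [he]; decide)
      · exact hin hfa
    rw [if_neg hne]
    cases hsp : PySem.Str.splitMax? (PySem.Str.strip item) "=" 1 with
    | none =>
      have hpi : pvParse item = none := by unfold pvParse; rw [if_neg hin, hsp]
      rw [hpi]
      simp only [Option.toList_none, List.append_nil]
      exact ⟨hd, hf, hv⟩
    | some parts =>
      rcases parts with _ | ⟨scheme, _ | ⟨value, restp⟩⟩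
      · have hpi : pvParse item = none := by unfold pvParse; rw [if_neg hin, hsp]
        rw [hpi]
        simp only [Option.toList_none, List.append_nil]
        exact ⟨hd, hf, hv⟩
      · have hpi : pvParse item = none := by unfold pvParse; rw [if_neg hin, hsp]
        rw [hpi]
        simp only [Option.toList_none, List.append_nil]
        exact ⟨hd, hf, hv⟩
      · dsimp only
        by_cases hv0 : PySem.Str.strip value = ""
        · have hpi : pvParse item = none := by
            unfold pvParse; rw [if_neg hin, hsp]; dsimp only; rw [if_pos hv0]
          rw [if_pos hv0, hpi]
          simp only [Option.toList_none, List.append_nil]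
          exact ⟨hd, hf, hv⟩
        · have hpi : pvParse item
              = some (PySem.Str.lower (PySem.Str.strip scheme), PySem.Str.strip value) := by
            unfold pvParse; rw [if_neg hin, hsp]; dsimp only; rw [if_neg hv0]
          rw [if_neg hv0, hpi, Option.toList_some]
          refine ⟨?_, ?_, ?_⟩
          · intro k
            rw [PySem.Dict.get?_insert, List.reverse_append]
            by_cases hk : k = PySem.Str.lower (PySem.Str.strip scheme)
            · simp [hk]
            · have hS : ((PySem.Str.lower (PySem.Str.strip scheme), PySem.Str.strip value).1 == k) = false := by
                simp only [beq_eq_false_iff_ne]; exact fun hc => hk hc.symm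
              simp only [List.reverse_cons, List.reverse_nil, List.nil_append,
                List.singleton_append, List.find?_cons, hS, if_neg hk]
              exact hd k
          · cases p with
            | nil =>
              have h0 : st.2 = none := hf
              simp [h0]
            | cons q qs =>
              have h0 : st.2 = some q.2 := hf
              simp [h0]
          · intro q hq
            rcases List.mem_append.mp hq with hq | hq
            · exact hv q hq
            · rcases List.mem_singleton.mp hq with rfl
              exact hv0

lemma pvInv_foldl (items : List String) (st : PySem.Dict String String × Option String)
    (p : List (String × String)) (h : pvInv st p) :
    pvInv (items.foldl pvStepA st) (p ++ items.filterMap pvParse) := by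
  induction items generalizing st p with
  | nil => simpa using h
  | cons it its ih =>
    have h2 := ih _ _ (pvInv_step st p h it)
    rw [List.filterMap_cons]
    cases hpi : pvParse it with
    | none => simpa [hpi] using h2
    | some q => simpa [hpi] using h2

-- ===== VERDICT (by name: the statement is the Claim_ definition above) =====
theorem normalize_proxy_server_spec : Claim_equal_normalize_proxy_server := by
  intro proxy_server _
  unfold Spec_normalize_proxy_server normalize_proxy_server normalize_proxy_server_alt
  set raw := PySem.Str.strip (proxy_server.getD "") with hraw
  by_cases h1 : raw = ""
  · rw [if_pos h1, if_pos h1]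
  · rw [if_neg h1, if_neg h1]
    by_cases h2 : PySem.Str.isIn "=" raw = false
    · rw [if_pos h2, if_pos h2]
    · rw [if_neg h2, if_neg h2]
      set items := (PySem.Str.split? raw ";").getD [] with hitems
      set P := items.filterMap pvParse with hP
      have hbase : pvInv (PySem.Dict.empty, none) ([] : List (String × String)) :=
        ⟨fun k => rfl, rfl, by simp⟩
      obtain ⟨hd, hf, hv⟩ := by
        simpa using pvInv_foldl items (PySem.Dict.empty, none) [] hbase
      set stA := items.foldl pvStepA (PySem.Dict.empty, none)
      have hB : pvLoopB items.reverse none none = pvSel P.reverse none none := by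
        rw [pvLoopB_eq_pvSel, List.filterMap_reverse]
      rw [hB]
      dsimp only
      unfold pvSel
      cases hh : P.reverse.find? (fun q => q.1 == "http") with
      | some q =>
        have hq : q.2 ≠ "" := hv q (List.mem_reverse.mp (List.mem_of_find?_eq_some hh))
        have hget : stA.1.get? "http" = some q.2 := by rw [hd "http", hh]; rfl
        rw [hget, if_pos (show pvTruthy (some q.2) = true by simp [pvTruthy, hq])]
      | none =>
        have hget : stA.1.get? "http" = none := by rw [hd "http", hh]; rfl
        rw [hget, if_neg (show ¬ pvTruthy (none : Option String) = true by decide)]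
        dsimp only
        cases hh2 : P.reverse.find? (fun q => q.1 == "https") with
        | some q =>
          have hq : q.2 ≠ "" := hv q (List.mem_reverse.mp (List.mem_of_find?_eq_some hh2))
          have hget2 : stA.1.get? "https" = some q.2 := by rw [hd "https", hh2]; rfl
          rw [hget2, if_pos (show pvTruthy (some q.2) = true by simp [pvTruthy, hq])]
        | none =>
          have hget2 : stA.1.get? "https" = none := by rw [hd "https", hh2]; rfl
          rw [hget2, if_neg (show ¬ pvTruthy (none : Option String) = true by decide)]
          rw [List.getLast?_reverse]
          cases hhd : P.head? with
          | none => rw [hf, hhd]; rfl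
          | some q => rw [hf, hhd]; rfl
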